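-- pv_equiv track=rewrite | github.com/minnseong/Algorithm | programmers/Test/Nextorial_Q3.py | getMinimumHealth
-- ===== SOURCE A (Python) =====
-- from bisect import bisect_left
--
-- def getMinimumHealth(initial_players, new_players, rank):
--
--     health = 0
--     initial_players.sort()
--
--     opponent = initial_players[len(initial_players)-rank]
--     health += opponent
--     for np in new_players:
--         initial_players.insert(bisect_left(initial_players, np), np)
--         health += initial_players[len(initial_players)-rank]
--
--     return health
-- ===== SOURCE B (Python) =====
-- from bisect import insort_left
--
-- def getMinimumHealth(initial_players, new_players, rank):
--     # Keep only the `rank` largest values seen so far, as a small sorted window;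
--     # its first element is always the rank-th largest.  (Does not mutate the
--     # arguments, unlike the original, which sorts/extends initial_players in place.)
--     top = sorted(initial_players)[len(initial_players) - rank:]
--     health = top[0]
--     for np in new_players:
--         if np > top[0]:
--             top.pop(0)
--             insort_left(top, np)
--         health += top[0]
--     return health
-- ===== Notes on version B (the rewrite author's own statement) =====
-- stated objective: faster
-- what changed: Instead of re-inserting every new player into the full, ever-growing sorted list and indexing it, B maintains only a sorted window of the rank largest values (pop min + insort when a new player beats it), whose first element is the rank-th largest.
-- outside the precondition, e.g. on getMinimumHealth([1, 2], [5], 3): A returns 3, B returns 7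
import Mathlib
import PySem

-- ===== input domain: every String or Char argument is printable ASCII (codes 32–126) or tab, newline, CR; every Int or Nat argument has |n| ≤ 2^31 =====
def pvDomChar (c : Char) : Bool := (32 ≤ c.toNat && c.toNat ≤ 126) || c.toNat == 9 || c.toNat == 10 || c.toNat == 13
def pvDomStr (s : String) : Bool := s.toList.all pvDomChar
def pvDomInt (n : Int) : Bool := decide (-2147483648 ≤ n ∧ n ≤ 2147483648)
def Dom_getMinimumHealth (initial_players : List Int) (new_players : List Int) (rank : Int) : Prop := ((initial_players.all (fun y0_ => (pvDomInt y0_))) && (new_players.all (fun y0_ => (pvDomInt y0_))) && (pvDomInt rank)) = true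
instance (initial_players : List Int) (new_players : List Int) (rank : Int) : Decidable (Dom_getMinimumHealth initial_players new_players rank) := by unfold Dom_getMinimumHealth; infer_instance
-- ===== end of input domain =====

-- B keeps a sorted window of the `rank` largest values instead of re-inserting each
-- new player into the full growing sorted list (objective: faster).  Note: A sorts
-- and extends initial_players IN PLACE; B does not mutate its arguments — the
-- equivalence proved here is about the return value only.

-- ===== PORT A =====
-- loop body of A: insert np at bisect_left position, add the rank-th largest
def pvAStep (rank : Int) (st : List Int × Int) (np : Int) : List Int × Int :=
  let l := PySem.List.insert st.1 ((PySem.List.bisectLeft st.1 np : Nat) : Int) np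
  (l, st.2 + (PySem.List.pyGet? l ((l.length : Int) - rank)).getD 0)

def getMinimumHealth (initial_players : List Int) (new_players : List Int) (rank : Int) : Int :=
  let health : Int := 0
  let s := PySem.List.sorted initial_players (fun x => x) false
  let opponent := (PySem.List.pyGet? s ((s.length : Int) - rank)).getD 0
  let health := health + opponent
  (new_players.foldl (pvAStep rank) (s, health)).2

-- ===== PORT B =====
-- loop body of B: if np beats the window minimum, pop it and insort np
def pvBStep (st : List Int × Int) (np : Int) : List Int × Int :=
  let t := if (PySem.List.pyGet? st.1 0).getD 0 < np
           then List.orderedInsert (· ≤ ·) np (st.1.drop 1)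
           else st.1
  (t, st.2 + (PySem.List.pyGet? t 0).getD 0)

def getMinimumHealth_alt (initial_players : List Int) (new_players : List Int) (rank : Int) : Int :=
  let s := PySem.List.sorted initial_players (fun x => x) false
  let top := PySem.List.slice s (some ((initial_players.length : Int) - rank)) none
  let health := (PySem.List.pyGet? top 0).getD 0
  (new_players.foldl pvBStep (top, health)).2

-- ===== PRECONDITION & SPEC =====
-- Pre_ restricts rank to the function's natural domain 1 ≤ rank ≤ len(initial_players);
-- outside it A either raises IndexError (rank ≤ 0, rank > 2·len, or an empty list) or
-- returns a value picked by Python's negative-index wraparound, a corner outside the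
-- task's natural domain that no caller would specify.
def Pre_getMinimumHealth (initial_players : List Int) (new_players : List Int) (rank : Int) : Prop :=
  1 ≤ rank ∧ rank ≤ (initial_players.length : Int)
instance (initial_players : List Int) (new_players : List Int) (rank : Int) : Decidable (Pre_getMinimumHealth initial_players new_players rank) := by unfold Pre_getMinimumHealth; infer_instance

def pvWitness_getMinimumHealth : List Int × List Int × Int := ([1, 2, 3], [2], 2)

def Spec_getMinimumHealth (initial_players : List Int) (new_players : List Int) (rank : Int) (out : Int) : Prop := out = getMinimumHealth_alt initial_players new_players rank
instance (initial_players : List Int) (new_players : List Int) (rank : Int) (out : Int) : Decidable (Spec_getMinimumHealth initial_players new_players rank out) := by unfold Spec_getMinimumHealth; infer_instance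

-- ===== CLAIM (what is proved, stated in full; the proofs are below) =====
def Claim_equal_getMinimumHealth : Prop := ∀ (initial_players : List Int) (new_players : List Int) (rank : Int), Dom_getMinimumHealth initial_players new_players rank → Pre_getMinimumHealth initial_players new_players rank → Spec_getMinimumHealth initial_players new_players rank (getMinimumHealth initial_players new_players rank)

-- ===== LEMMAS AND PROOFS =====

-- orderedInsert inserts at any position q that separates elements < x from elements ≥ x
lemma orderedInsert_eq_take_drop (l : List Int) (x : Int) (q : Nat) (hq : q ≤ l.length)
    (h1 : ∀ (j : Nat) (hj : j < l.length), j < q → l[j] < x)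
    (h2 : ∀ (j : Nat) (hj : j < l.length), q ≤ j → x ≤ l[j]) :
    List.orderedInsert (· ≤ ·) x l = l.take q ++ x :: l.drop q := by
  induction l generalizing q with
  | nil => simp at hq; subst hq; simp [List.orderedInsert]
  | cons a l ih =>
    cases q with
    | zero =>
      have : x ≤ a := h2 0 (by simp) (by omega)
      simp [List.orderedInsert, this]
    | succ q =>
      have ha : a < x := h1 0 (by simp) (by omega)
      have : ¬ x ≤ a := by omega
      simp only [List.orderedInsert, this, if_false, List.take_succ_cons, List.drop_succ_cons,
        List.cons_append, List.cons.injEq, true_and]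
      exact ih q (by simpa using hq)
        (fun j hj hjq => h1 (j+1) (by simpa using hj) (by omega))
        (fun j hj hjq => h2 (j+1) (by simpa using hj) (by omega))

-- A's `insert at bisect_left` on a sorted list IS orderedInsert
lemma insert_bisectLeft_eq (s : List Int) (x : Int) (hs : s.Pairwise (· ≤ ·)) :
    PySem.List.insert s ((PySem.List.bisectLeft s x : Nat) : Int) x
      = List.orderedInsert (· ≤ ·) x s := by
  obtain ⟨hle, h1, h2⟩ := PySem.List.bisectLeft_spec s x hs
  rw [PySem.List.insert_natCast s _ x hle,
    orderedInsert_eq_take_drop s x (PySem.List.bisectLeft s x) hle h1 h2]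

lemma orderedInsert_append_le (low ts : List Int) (m x : Int) (hx : x ≤ m) :
    List.orderedInsert (· ≤ ·) x (low ++ m :: ts)
      = List.orderedInsert (· ≤ ·) x low ++ m :: ts := by
  induction low with
  | nil => simp [List.orderedInsert, hx]
  | cons a l ih =>
    by_cases h : x ≤ a <;> simp [List.orderedInsert, h, ih]

lemma orderedInsert_append_gt (low ts : List Int) (x : Int)
    (hlow : ∀ y ∈ low, ¬ x ≤ y) :
    List.orderedInsert (· ≤ ·) x (low ++ ts) = low ++ List.orderedInsert (· ≤ ·) x ts := by
  induction low with
  | nil => simp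
  | cons a l ih =>
    have : ¬ x ≤ a := hlow a (by simp)
    simp only [List.cons_append, List.orderedInsert, this, if_false]
    rw [ih (fun y hy => hlow y (by simp [hy]))]

lemma orderedInsert_ne_nil (x : Int) (l : List Int) :
    List.orderedInsert (· ≤ ·) x l ≠ [] := by
  have := List.orderedInsert_length (· ≤ ·) l x
  intro h; rw [h] at this; simp at this

-- main loop invariant: A's state is low ++ ts with ts = B's window (length k = rank),
-- all of low ≤ head of ts, the whole list sorted; then the accumulated healths agree.
lemma loop_eq (rank : Int) (k : Nat) (hk : 0 < k) (hrk : rank = (k : Int)) :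
    ∀ (nps low ts : List Int) (h : Int),
      (low ++ ts).Pairwise (· ≤ ·) → ts.length = k →
      (nps.foldl (pvAStep rank) (low ++ ts, h)).2 = (nps.foldl pvBStep (ts, h)).2 := by
  intro nps
  induction nps with
  | nil => intro low ts h _ _; rfl
  | cons x nps ih =>
    intro low ts h hsort hlen
    obtain ⟨m, ts'', rfl⟩ : ∃ m ts'', ts = m :: ts'' := by
      cases ts with
      | nil => simp at hlen; omega
      | cons a b => exact ⟨a, b, rfl⟩
    simp only [List.foldl_cons]
    have hins := insert_bisectLeft_eq (low ++ m :: ts'') x hsort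
    by_cases hx : x ≤ m
    · -- new player does not beat the window minimum
      have hA : pvAStep rank (low ++ m :: ts'', h) x
          = (List.orderedInsert (· ≤ ·) x low ++ m :: ts'', h + m) := by
        simp only [pvAStep, hins, orderedInsert_append_le low ts'' m x hx]
        have hidx : ((List.orderedInsert (· ≤ ·) x low ++ m :: ts'').length : Int) - rank
            = ((List.orderedInsert (· ≤ ·) x low).length : Int) := by
          have hlen'' : ts''.length + 1 = k := by simpa using hlen
          rw [hrk]
          simp only [List.length_append, List.length_cons, List.orderedInsert_length]
          push_cast
          omega
        rw [hidx, PySem.List.pyGet?_append_length]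
        simp
      have hB : pvBStep (m :: ts'', h) x = (m :: ts'', h + m) := by
        simp only [pvBStep, PySem.List.pyGet?_zero_cons, Option.getD_some]
        rw [if_neg (by omega)]
        simp
      rw [hA, hB]
      have hsort' : (List.orderedInsert (· ≤ ·) x low ++ m :: ts'').Pairwise (· ≤ ·) := by
        rw [← orderedInsert_append_le low ts'' m x hx]
        exact List.Pairwise.orderedInsert x _ hsort
      exact ih _ _ _ hsort' hlen
    · -- new player beats the window minimum m: m leaves the window, x is insorted
      have hlowm : ∀ y ∈ low, y ≤ m := by
        intro y hy
        exact (List.pairwise_append.mp hsort).2.2 y hy m (by simp)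
      have hgt : ∀ y ∈ low ++ [m], ¬ x ≤ y := by
        intro y hy
        rcases List.mem_append.mp hy with h1 | h1
        · have := hlowm y h1; omega
        · simp at h1; omega
      have hsplit : List.orderedInsert (· ≤ ·) x (low ++ m :: ts'')
          = (low ++ [m]) ++ List.orderedInsert (· ≤ ·) x ts'' := by
        have : low ++ m :: ts'' = (low ++ [m]) ++ ts'' := by simp
        rw [this, orderedInsert_append_gt _ _ _ hgt]
      obtain ⟨e, es, hes⟩ : ∃ e es, List.orderedInsert (· ≤ ·) x ts'' = e :: es := by
        cases h' : List.orderedInsert (· ≤ ·) x ts'' with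
        | nil => exact absurd h' (orderedInsert_ne_nil x ts'')
        | cons a b => exact ⟨a, b, rfl⟩
      have hlen' : (e :: es).length = k := by
        have := List.orderedInsert_length (· ≤ ·) ts'' x
        rw [hes] at this
        simp at this ⊢
        simp at hlen
        omega
      have hA : pvAStep rank (low ++ m :: ts'', h) x
          = ((low ++ [m]) ++ e :: es, h + e) := by
        simp only [pvAStep, hins, hsplit, hes]
        have hidx : (((low ++ [m]) ++ e :: es).length : Int) - rank
            = (((low ++ [m]).length : Int)) := by
          have h1 : es.length + 1 = k := by simpa using hlen'
          rw [hrk]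
          simp only [List.length_append, List.length_cons]
          push_cast
          omega
        rw [hidx, PySem.List.pyGet?_append_length]
        simp
      have hB : pvBStep (m :: ts'', h) x = (e :: es, h + e) := by
        simp only [pvBStep, PySem.List.pyGet?_zero_cons, Option.getD_some, List.drop_one,
          List.tail_cons]
        rw [if_pos (by omega), hes]
        simp
      rw [hA, hB]
      have hsort' : ((low ++ [m]) ++ e :: es).Pairwise (· ≤ ·) := by
        rw [← hes, ← hsplit]
        exact List.Pairwise.orderedInsert x _ hsort
      exact ih _ _ _ hsort' hlen'
    
-- ===== VERDICT (by name: the statement is the Claim_ definition above) =====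
theorem getMinimumHealth_spec : Claim_equal_getMinimumHealth := by
  intro ip nps rank _ hpre
  obtain ⟨h1, h2⟩ := hpre
  unfold Spec_getMinimumHealth getMinimumHealth getMinimumHealth_alt
  dsimp only
  set s := PySem.List.sorted ip (fun x => x) false with hs
  have hslen : s.length = ip.length := PySem.List.length_sorted ip _ false
  have hsort : s.Pairwise (· ≤ ·) := PySem.List.sorted_pairwise ip (fun x => x)
  set k : Nat := rank.toNat with hkdef
  have hk : 0 < k := by omega
  have hrk : rank = (k : Int) := by omega
  have hkle : k ≤ s.length := by omega
  -- the window is the last k elements of the sorted list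
  have htop : PySem.List.slice s (some ((ip.length : Int) - rank)) none
      = s.drop (s.length - k) := by
    rw [PySem.List.slice_from s (show (0:Int) ≤ (ip.length : Int) - rank by omega)]
    congr 1
    omega
  have hsplit : s.take (s.length - k) ++ s.drop (s.length - k) = s :=
    List.take_append_drop _ s
  have hdroplen : (s.drop (s.length - k)).length = k := by
    simp [List.length_drop]; omega
  obtain ⟨e, es, hes⟩ : ∃ e es, s.drop (s.length - k) = e :: es := by
    cases h' : s.drop (s.length - k) with
    | nil => rw [h'] at hdroplen; simp at hdroplen; omega
    | cons a b => exact ⟨a, b, rfl⟩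
  have htakelen : (s.take (s.length - k)).length = s.length - k := by
    simp [List.length_take]
  -- generic: indexing right after a prefix reads the head of the suffix
  have key : ∀ (l pre suf : List Int) (y : Int), l = pre ++ y :: suf →
      PySem.List.pyGet? l ((pre.length : Nat) : Int) = some y := by
    rintro l pre suf y rfl
    exact PySem.List.pyGet?_append_length _ _ _
  -- A's first opponent = head of the window
  have hidx0 : ((s.length : Int) - rank) = (((s.take (s.length - k)).length : Nat) : Int) := by
    rw [htakelen]; omega
  have hget0 : (PySem.List.pyGet? s ((s.length : Int) - rank)).getD 0 = e := by
    rw [hidx0, key s _ es e (by rw [← hes]; exact hsplit.symm)]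
    rfl
  rw [htop, hes, hget0, zero_add]
  conv_lhs => rw [← hsplit, hes]
  simp only [PySem.List.pyGet?_zero_cons, Option.getD_some]
  exact loop_eq rank k hk hrk nps _ (e :: es) e
    (by rw [← hes, hsplit]; exact hsort) (by rw [← hes]; exact hdroplen)
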